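-- pv_equiv track=rewrite | github.com/tomaszmj/AdventOfCode2022 | day3/solve2.py | find_item_in_3_rucksacks
-- ===== SOURCE A (Python) =====
-- def find_item_in_3_rucksacks(lines) -> str:
--     common_items = set()
--     for line in lines:
--         s = set(line)
--         if not common_items:
--             common_items = s
--         else:
--             common_items.intersection_update(s)
--     if len(common_items) != 1:
--         raise BaseException(f"expected 1 common item, got {common_items}")
--     return common_items.pop()
-- ===== SOURCE B (Python) =====
-- def find_item_in_3_rucksacks(lines) -> str:
--     counts = {}
--     n = 0
--     for line in lines:
--         n += 1
--         for c in set(line):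
--             counts[c] = counts.get(c, 0) + 1
--     common_items = {c for c, v in counts.items() if v == n}
--     if len(common_items) != 1:
--         raise BaseException(f"expected 1 common item, got {common_items}")
--     return common_items.pop()
-- ===== Notes on version B (the rewrite author's own statement) =====
-- stated objective: idiomatic
-- what changed: B builds a per-line presence-count table (dict of char -> number of lines containing it) and selects chars whose count equals the number of lines, instead of A's incremental set intersection with its reset-after-empty-intersection state.
-- outside the precondition, e.g. on find_item_in_3_rucksacks(['', 'a']): A returns 'a', B raises BaseException; on find_item_in_3_rucksacks(['ab', 'cd', 'c']): A returns 'c', B raises BaseException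
import Mathlib
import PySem

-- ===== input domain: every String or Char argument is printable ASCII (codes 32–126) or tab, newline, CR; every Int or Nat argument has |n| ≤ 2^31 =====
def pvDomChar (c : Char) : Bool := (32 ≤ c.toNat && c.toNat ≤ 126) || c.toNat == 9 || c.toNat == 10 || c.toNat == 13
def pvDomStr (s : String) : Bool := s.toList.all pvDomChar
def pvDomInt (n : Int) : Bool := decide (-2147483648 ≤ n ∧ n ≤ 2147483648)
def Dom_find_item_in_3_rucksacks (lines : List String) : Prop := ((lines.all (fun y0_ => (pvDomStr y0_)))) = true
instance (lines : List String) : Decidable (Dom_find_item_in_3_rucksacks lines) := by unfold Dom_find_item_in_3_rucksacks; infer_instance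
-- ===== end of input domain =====

-- B replaces A's incremental set intersection (which resets after an empty intersection)
-- by a presence-count table selecting chars whose count equals the number of lines (idiomatic, same cost).


-- ===== PORT A =====
def find_item_in_3_rucksacks (lines : List String) : String :=
  let common := lines.foldl (fun (acc : PySem.Set Char) line =>
    let s : PySem.Set Char := PySem.Set.ofList line.toList
    if acc.isEmpty then s else PySem.Set.inter acc s) ([] : PySem.Set Char)
  match common with
  | [c] => String.ofList [c]
  | _ => ""   -- here the Python raises BaseException; excluded by Pre_

-- ===== PORT B =====
def find_item_in_3_rucksacks_alt (lines : List String) : String :=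
  let st := lines.foldl (fun (st : PySem.Dict Char Int × Int) line =>
      ((PySem.Set.ofList line.toList).foldl (fun d c => d.insert c (d.getD c 0 + 1)) st.1,
       st.2 + 1))
    (PySem.Dict.empty, (0 : Int))
  let common : PySem.Set Char := (st.1.items.filter (fun kv => kv.2 == st.2)).map Prod.fst
  if common.length == 1 then String.ofList common   -- the pop() of the one-element set
  else ""   -- here the Python raises BaseException; excluded by Pre_

-- ===== PRECONDITION & SPEC =====
-- the characters common to every line, in first-line first-occurrence order
def pvCommonChars (lines : List String) : List Char :=
  (PySem.List.dedup (lines.headD "").toList).filter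
    (fun c => lines.all (fun l => l.toList.contains c))

-- Pre_ excludes the empty list, inputs containing an empty line, and inputs without exactly one
-- character common to all lines: on some of these A restarts from the next line after an empty
-- intermediate intersection and still returns a value, while B's natural algorithm raises there.
def Pre_find_item_in_3_rucksacks (lines : List String) : Prop :=
  lines ≠ [] ∧ (∀ l ∈ lines, l.toList ≠ []) ∧ (pvCommonChars lines).length = 1
instance (lines : List String) : Decidable (Pre_find_item_in_3_rucksacks lines) := by
  unfold Pre_find_item_in_3_rucksacks; infer_instance

def pvWitness_find_item_in_3_rucksacks : List String := ["ab", "bc", "b"]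

def Spec_find_item_in_3_rucksacks (lines : List String) (out : String) : Prop := out = find_item_in_3_rucksacks_alt lines
instance (lines : List String) (out : String) : Decidable (Spec_find_item_in_3_rucksacks lines out) := by unfold Spec_find_item_in_3_rucksacks; infer_instance

-- ===== CLAIM (what is proved, stated in full; the proofs are below) =====
def Claim_equal_find_item_in_3_rucksacks : Prop := ∀ (lines : List String), Dom_find_item_in_3_rucksacks lines → Pre_find_item_in_3_rucksacks lines → Spec_find_item_in_3_rucksacks lines (find_item_in_3_rucksacks lines)

-- ===== LEMMAS AND PROOFS =====

-- A's loop, once the accumulator is a nonempty set that keeps a common element, is a filter.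
theorem pv_a_fold (ls : List String) (acc : PySem.Set Char)
    (hne : ∃ c ∈ acc, ∀ l ∈ ls, c ∈ l.toList) :
    ls.foldl (fun (acc : PySem.Set Char) line =>
      let s : PySem.Set Char := PySem.Set.ofList line.toList
      if acc.isEmpty then s else PySem.Set.inter acc s) acc
    = acc.filter (fun c => ls.all (fun l => l.toList.contains c)) := by
  induction ls generalizing acc with
  | nil => simp
  | cons l ls ih =>
    obtain ⟨c, hc, hall⟩ := hne
    have hacc : acc.isEmpty = false := by
      rw [List.isEmpty_eq_false_iff_exists_mem]; exact ⟨c, hc⟩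
    have hinter : PySem.Set.inter acc (PySem.Set.ofList l.toList)
        = acc.filter (fun c => (PySem.Set.ofList l.toList).contains c) := rfl
    simp only [List.foldl_cons, hacc, Bool.false_eq_true, if_false, hinter]
    rw [ih]
    · rw [List.filter_filter]
      apply List.filter_congr
      intro x _
      simp [PySem.Set.mem_ofList, Bool.and_comm]
    · refine ⟨c, ?_, fun l' hl' => hall l' (List.mem_cons_of_mem _ hl')⟩
      rw [List.mem_filter]
      refine ⟨hc, ?_⟩
      have := hall l List.mem_cons_self
      simpa [PySem.Set.mem_ofList] using this

-- B's counting loop: each char's count is the number of lines containing it.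
theorem pv_b_counts (lines : List String) (d : PySem.Dict Char Int) (c : Char) :
    (lines.foldl (fun (d : PySem.Dict Char Int) line =>
        (PySem.Set.ofList line.toList).foldl (fun d c => d.insert c (d.getD c 0 + 1)) d) d).getD c 0
    = d.getD c 0 + (lines.countP (fun l => l.toList.contains c) : Int) := by
  induction lines generalizing d with
  | nil => simp
  | cons l ls ih =>
    simp only [List.foldl_cons]
    rw [ih, PySem.Dict.getD_foldl_insert_add_one]
    have hcount : (PySem.Set.ofList l.toList).count c = if l.toList.contains c then 1 else 0 := by
      by_cases h : c ∈ l.toList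
      · have : c ∈ PySem.Set.ofList l.toList := (PySem.Set.mem_ofList _ _).2 h
        rw [List.count_eq_one_of_mem (PySem.Set.nodup_ofList _) this]
        simp [h]
      · have : c ∉ PySem.Set.ofList l.toList := fun hh => h ((PySem.Set.mem_ofList _ _).1 hh)
        rw [List.count_eq_zero_of_not_mem this]
        simp [h]
    rw [List.countP_cons, hcount]
    by_cases h : c ∈ l.toList <;> simp [h] <;> ring

theorem pv_len_fold (lines : List String) (a : Int) :
    lines.foldl (fun (m : Int) _ => m + 1) a = a + lines.length := by
  induction lines generalizing a with
  | nil => simp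
  | cons l ls ih => simp [ih]; ring

theorem pv_keys_nodup (lines : List String) (d : PySem.Dict Char Int) (h : d.keys.Nodup) :
    (lines.foldl (fun (d : PySem.Dict Char Int) line =>
        (PySem.Set.ofList line.toList).foldl (fun d c => d.insert c (d.getD c 0 + 1)) d) d).keys.Nodup := by
  induction lines generalizing d with
  | nil => exact h
  | cons l ls ih => exact ih _ (PySem.Dict.nodup_keys_foldl_insert _ _ _ h)

theorem pv_keys_mono (lines : List String) (d : PySem.Dict Char Int) (c : Char)
    (h : c ∈ d.keys) :
    c ∈ (lines.foldl (fun (d : PySem.Dict Char Int) line =>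
        (PySem.Set.ofList line.toList).foldl (fun d c => d.insert c (d.getD c 0 + 1)) d) d).keys := by
  induction lines generalizing d with
  | nil => exact h
  | cons l ls ih =>
    apply ih
    rw [PySem.Dict.keys_foldl_insert]
    exact (PySem.Set.mem_update _ _ _).2 (Or.inl h)

theorem pv_mem_keys (lines : List String) (d : PySem.Dict Char Int) (c : Char)
    (h : ∃ l ∈ lines, c ∈ l.toList) :
    c ∈ (lines.foldl (fun (d : PySem.Dict Char Int) line =>
        (PySem.Set.ofList line.toList).foldl (fun d c => d.insert c (d.getD c 0 + 1)) d) d).keys := by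
  induction lines generalizing d with
  | nil => simp at h
  | cons l ls ih =>
    obtain ⟨l', hl', hc⟩ := h
    rcases List.mem_cons.1 hl' with rfl | hl'
    · simp only [List.foldl_cons]
      apply pv_keys_mono
      rw [PySem.Dict.keys_foldl_insert]
      exact (PySem.Set.mem_update _ _ _).2 (Or.inr ((PySem.Set.mem_ofList _ _).2 hc))
    · exact ih _ ⟨l', hl', hc⟩

-- a Nodup list filtered by equality with one of its members is that singleton
theorem pv_filter_singleton {l : List Char} {c₀ : Char} (hnd : l.Nodup) (hmem : c₀ ∈ l)
    (p : Char → Bool) (hp : ∀ x ∈ l, p x = (x == c₀)) :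
    l.filter p = [c₀] := by
  rw [List.filter_congr hp, List.filter_beq, List.count_eq_one_of_mem hnd hmem,
    List.replicate_one]

-- ===== VERDICT (by name: the statement is the Claim_ definition above) =====
theorem find_item_in_3_rucksacks_spec : Claim_equal_find_item_in_3_rucksacks := by
  intro lines _ hpre
  obtain ⟨hnil, hnonempty, hlen⟩ := hpre
  obtain ⟨c₀, hc₀⟩ := List.length_eq_one_iff.1 hlen
  obtain ⟨h, t, rfl⟩ := List.exists_cons_of_ne_nil hnil
  have hCiff : ∀ c : Char, (∀ l ∈ h :: t, c ∈ l.toList) ↔ c = c₀ := by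
    intro c
    have hm : c ∈ pvCommonChars (h :: t) ↔ (∀ l ∈ h :: t, c ∈ l.toList) := by
      unfold pvCommonChars
      rw [List.mem_filter]
      simp only [List.headD_cons, PySem.List.mem_dedup, List.all_eq_true]
      constructor
      · rintro ⟨_, hall⟩ l hl
        simpa using hall l hl
      · intro hall
        exact ⟨hall h List.mem_cons_self, fun l hl => by simpa using hall l hl⟩
    rw [← hm, hc₀, List.mem_singleton]
  have hc₀all : ∀ l ∈ h :: t, c₀ ∈ l.toList := (hCiff c₀).2 rfl
  have hc₀h : c₀ ∈ h.toList := hc₀all h List.mem_cons_self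
  -- A's side
  have hA : find_item_in_3_rucksacks (h :: t) = String.ofList [c₀] := by
    simp only [find_item_in_3_rucksacks, List.foldl_cons, List.isEmpty_nil, if_true]
    rw [pv_a_fold t (PySem.Set.ofList h.toList)
      ⟨c₀, (PySem.Set.mem_ofList _ _).2 hc₀h, fun l hl => hc₀all l (List.mem_cons_of_mem _ hl)⟩]
    rw [pv_filter_singleton (PySem.Set.nodup_ofList _) ((PySem.Set.mem_ofList _ _).2 hc₀h) _ ?_]
    intro x hx
    have hxh : x ∈ h.toList := (PySem.Set.mem_ofList _ _).1 hx
    rw [Bool.eq_iff_iff]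
    simp only [List.all_eq_true, beq_iff_eq]
    rw [← hCiff x]
    constructor
    · intro hall l hl
      rcases List.mem_cons.1 hl with rfl | hl
      · exact hxh
      · simpa using hall l hl
    · intro hall l hl
      simpa using hall l (List.mem_cons_of_mem _ hl)
  -- B's side
  have hB : find_item_in_3_rucksacks_alt (h :: t) = String.ofList [c₀] := by
    simp only [find_item_in_3_rucksacks_alt]
    rw [PySem.List.foldl_prod_mk
      (f := fun (d : PySem.Dict Char Int) (line : String) =>
        (PySem.Set.ofList line.toList).foldl (fun d c => d.insert c (d.getD c 0 + 1)) d)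
      (g := fun (m : Int) (_ : String) => m + 1)]
    set counts := (h :: t).foldl (fun (d : PySem.Dict Char Int) line =>
        (PySem.Set.ofList line.toList).foldl (fun d c => d.insert c (d.getD c 0 + 1)) d)
      PySem.Dict.empty with hcounts
    have hnd : counts.keys.Nodup := pv_keys_nodup _ _ (by simp [PySem.Dict.keys_empty])
    have hn : (h :: t).foldl (fun (m : Int) _ => m + 1) 0 = ((h :: t).length : Int) := by
      rw [pv_len_fold]; ring
    rw [hn, PySem.Dict.items_eq_map_keys counts hnd 0, List.filter_map, List.map_map]
    have hkey : ∀ k : Char,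
        (counts.getD k 0 == ((h :: t).length : Int)) = (k == c₀) := by
      intro k
      rw [hcounts, pv_b_counts]
      rw [Bool.eq_iff_iff]
      simp only [beq_iff_eq, PySem.Dict.getD_empty, zero_add, Nat.cast_inj]
      rw [List.countP_eq_length, ← hCiff k]
      constructor
      · intro hall l hl; simpa using hall l hl
      · intro hall l hl; simpa using hall l hl
    have hfil : counts.keys.filter
        ((fun kv => kv.2 == ((h :: t).length : Int)) ∘ fun k => (k, counts.getD k 0)) = [c₀] := by
      apply pv_filter_singleton hnd (pv_mem_keys _ _ _ ⟨h, List.mem_cons_self, hc₀h⟩)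
      intro x _
      simpa using hkey x
    rw [hfil]
    rfl
  rw [Spec_find_item_in_3_rucksacks, hA, hB]
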